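-- pv_equiv track=rewrite | github.com/danthb/python-review | extras/letra_mas_comun.py | letra_mas_comun
-- ===== SOURCE A (Python) =====
-- def letra_mas_comun(cadena):
--     cadena = cadena.replace(" ", "").replace(",", "").replace(".", "").replace("!", "").replace("?", "").replace("¿", "").replace("¡", "").replace(";", "").replace(":", "").replace("-", "").replace("_", "").replace("(", "").replace(")", "").replace("[", "").replace("]", "").replace("{", "").replace("}", "").replace("/", "").replace("\\", "").replace("*", "").replace("+", "").replace("=", "").replace("<", "").replace(">", "").replace("|", "").replace("@", "").replace("#", "").replace("$", "").replace("%", "").replace("&", "").replace("^", "").replace("~", "").replace("`", "").replace("¬", "").replace("'", "").replace("\"", "").replace("°", "").replace("¦", "").replace("·", "").replace(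
--         "¿", "").replace("¡", "").replace("º", "").replace("ª", "").replace("¬", "").replace("µ", "").replace("·", "").replace("¸", "").replace("¹", "").replace("º", "").replace("¼", "").replace("½", "").replace("¾", "").replace("¿", "").replace("À", "").replace("Á", "").replace("Â", "").replace("Ã", "").replace("Ä", "").replace("Å", "").replace("Æ", "").replace("Ç", "").replace("È", "").replace("É", "").replace("Ê", "").replace("Ë", "").replace("Ì", "").replace("Í", "").replace("Î", "").replace("Ï", "").replace("Ð", "").replace("Ñ", "").replace("Ò", "").replace("Ó", "").replace("Ô", "").replace("Õ", "").replace("Ö", "").replace("Ø", "").replace("Ù", "").replace("Ú", "").replace("Û", "")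
--     dic = {}
--     # llenamos un diccionario con las letras y sus apariciones
--     for letra in cadena:
--         if letra in dic:
--             dic[letra] += 1
--         else:
--             dic[letra] = 1
--     # obtenemos el valor mayor del diccionario
--     mayor = dic[max(dic, key=dic.get)]
--     # creamos una lista con tuplas de todas las letras iguales al valor mayor
--     lista = [(k, v) for k, v in dic.items() if v == mayor]
--     # devolvemos el primer elemento de la última tupla
--     letra = sorted(lista)[-1][0]
--     return letra
-- ===== SOURCE B (Python) =====
-- # Same letter-frequency task: one filtered counting pass plus a single keyed
-- # max over (count, letter) instead of 80 replace() passes and the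
-- # find-max / filter / sort / last tail.
-- PUNCT = set(' ,.!?\u00bf\u00a1;:-_()[]{}/\\*+=<>|@#$%&^~`\u00ac\'"\u00b0\u00a6\u00b7\u00bf\u00a1\u00ba\u00aa\u00ac\u00b5\u00b7\u00b8\u00b9\u00ba\u00bc\u00bd\u00be\u00bf\u00c0\u00c1\u00c2\u00c3\u00c4\u00c5\u00c6\u00c7\u00c8\u00c9\u00ca\u00cb\u00cc\u00cd\u00ce\u00cf\u00d0\u00d1\u00d2\u00d3\u00d4\u00d5\u00d6\u00d8\u00d9\u00da\u00db')
--
--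
-- def letra_mas_comun(cadena):
--     dic = {}
--     for letra in cadena:
--         if letra not in PUNCT:
--             dic[letra] = dic.get(letra, 0) + 1
--     return max(dic.items(), key=lambda kv: (kv[1], kv[0]))[0]
-- ===== Notes on version B (the rewrite author's own statement) =====
-- stated objective: simpler
-- what changed: B replaces A's 80 successive str.replace passes over the whole string by one filtered counting pass over the characters, and replaces A's find-max-value / filter / sort / take-last tie-break tail by a single max over the dict items keyed by (count, letter).
import Mathlib
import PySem

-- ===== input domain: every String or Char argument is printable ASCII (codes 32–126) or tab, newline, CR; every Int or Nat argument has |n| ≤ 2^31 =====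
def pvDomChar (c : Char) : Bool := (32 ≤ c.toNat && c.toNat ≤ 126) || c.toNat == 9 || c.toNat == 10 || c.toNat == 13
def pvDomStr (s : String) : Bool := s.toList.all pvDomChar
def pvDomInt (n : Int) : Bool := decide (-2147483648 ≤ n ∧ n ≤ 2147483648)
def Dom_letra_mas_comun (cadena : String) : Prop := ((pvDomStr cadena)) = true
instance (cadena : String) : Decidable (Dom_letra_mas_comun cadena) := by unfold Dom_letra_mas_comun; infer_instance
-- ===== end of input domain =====

-- B replaces A's 80 successive str.replace passes and its find-max/filter/sort/last
-- tie-break tail by one filtered counting pass and a single keyed max over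
-- (count, letter); same return value on every input where A returns.

-- ===== PORT A =====
def letra_mas_comun (cadena : String) : String :=
  let cadena2 := (PySem.Str.replace (PySem.Str.replace (PySem.Str.replace (PySem.Str.replace (PySem.Str.replace (PySem.Str.replace (PySem.Str.replace (PySem.Str.replace (PySem.Str.replace (PySem.Str.replace (PySem.Str.replace (PySem.Str.replace (PySem.Str.replace (PySem.Str.replace (PySem.Str.replace (PySem.Str.replace (PySem.Str.replace (PySem.Str.replace (PySem.Str.replace (PySem.Str.replace (PySem.Str.replace (PySem.Str.replace (PySem.Str.replace (PySem.Str.replace (PySem.Str.replace (PySem.Str.replace (PySem.Str.replace (PySem.Str.replace (PySem.Str.replace (PySem.Str.replace (PySem.Str.replace (PySem.Str.replace (PySem.Str.replace (PySem.Str.replace (PySem.Str.replace (PySem.Str.replace (PySem.Str.replace (PySem.Str.replace (PySem.Str.replace (PySem.Str.replace (PySem.Str.replace (PySem.Str.replace (PySem.Str.replace (PySem.Str.replace (PySem.Str.replace (PySem.Str.replace (PySem.Str.replace (PySem.Str.replace (PySem.Str.replace (PySem.Str.replace (PySem.Str.replace (PySem.Str.replace (PySem.Str.replace (PySem.Str.replace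 (PySem.Str.replace (PySem.Str.replace (PySem.Str.replace (PySem.Str.replace (PySem.Str.replace (PySem.Str.replace (PySem.Str.replace (PySem.Str.replace (PySem.Str.replace (PySem.Str.replace (PySem.Str.replace (PySem.Str.replace (PySem.Str.replace (PySem.Str.replace (PySem.Str.replace (PySem.Str.replace (PySem.Str.replace (PySem.Str.replace (PySem.Str.replace (PySem.Str.replace (PySem.Str.replace (PySem.Str.replace (PySem.Str.replace (PySem.Str.replace (PySem.Str.replace (PySem.Str.replace cadena " " "") "," "") "." "") "!" "") "?" "") "¿" "") "¡" "") ";" "") ":" "") "-" "") "_" "") "(" "") ")" "") "[" "") "]" "") "{" "") "}" "") "/" "") "\\" "") "*" "") "+" "") "=" "") "<" "") ">" "") "|" "") "@" "") "#" "") "$" "") "%" "") "&" "") "^" "") "~" "") "`" "") "¬" "") "'" "") "\"" "") "°" "") "¦" "") "·" "") "¿" "") "¡" "") "º" "") "ª" "") "¬" "") "µ" "") "·" "") "¸" "") "¹" "") "º" "") "¼" "") "½" "") "¾" "") "¿" "") "À" "") "Á" "") "Â" "") "Ã" "") "Ä" "") "Å" "") "Æ" "") "Ç" "") "È" "") "É"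 "") "Ê" "") "Ë" "") "Ì" "") "Í" "") "Î" "") "Ï" "") "Ð" "") "Ñ" "") "Ò" "") "Ó" "") "Ô" "") "Õ" "") "Ö" "") "Ø" "") "Ù" "") "Ú" "") "Û" "")
  let dic := cadena2.toList.foldl (fun d letra =>
    if d.contains letra then d.insert letra (d.getD letra 0 + 1) else d.insert letra (1 : Int))
    PySem.Dict.empty
  match PySem.List.max? dic.keys (fun k => dic.getD k 0) with
  | none => ""  -- Python raises ValueError here (max() of an empty dict); excluded by Pre_
  | some kmax =>
    let mayor := dic.getD kmax 0
    let lista := dic.items.filter (fun kv => kv.2 == mayor)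
    let letra := (PySem.List.pyGetD (PySem.List.sorted2 lista (fun kv => kv.1) (fun kv => kv.2)) (-1) (' ', 0)).1
    String.ofList [letra]

-- ===== PORT B =====
def pvPunctB : String := " ,.!?¿¡;:-_()[]{}/\\*+=<>|@#$%&^~`¬'\"°¦·¿¡ºª¬µ·¸¹º¼½¾¿ÀÁÂÃÄÅÆÇÈÉÊËÌÍÎÏÐÑÒÓÔÕÖØÙÚÛ"

def letra_mas_comun_alt (cadena : String) : String :=
  let punct : PySem.Set Char := PySem.Set.ofList pvPunctB.toList
  let dic := cadena.toList.foldl (fun d letra =>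
    if punct.contains letra then d else d.insert letra (d.getD letra (0 : Int) + 1))
    PySem.Dict.empty
  match PySem.List.max2? dic.items (fun kv => kv.2) (fun kv => kv.1) with
  | none => ""  -- Python raises ValueError here (max() of an empty sequence); excluded by Pre_
  | some kv => String.ofList [kv.1]

-- ===== PRECONDITION & SPEC =====
-- pvPunctL lists exactly the characters A's replace() chain strips (= pvPunctB.toList).
def pvPunctL : List Char := [' ', ',', '.', '!', '?', '¿', '¡', ';', ':', '-', '_', '(', ')', '[', ']', '{', '}', '/', '\\', '*', '+', '=', '<', '>', '|', '@', '#', '$', '%', '&', '^', '~', '`', '¬', '\'', '"', '°', '¦', '·', '¿', '¡', 'º', 'ª', '¬', 'µ', '·', '¸', '¹', 'º', '¼', '½', '¾', '¿', 'À', 'Á', 'Â', 'Ã', 'Ä', 'Å', 'Æ', 'Ç', 'È', 'É', 'Ê', 'Ë', 'Ì', 'Í', 'Î', 'Ï', 'Ð', 'Ñ', 'Ò', 'Ó', 'Ô', 'Õ', 'Ö', 'Ø', 'Ù', 'Ú', 'Û']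

-- Pre_: some character of cadena survives A's punctuation stripping (is not one of the
-- characters A strips); on exactly the excluded inputs Python A raises ValueError
-- (max() over an empty dict), as does B (max() over an empty items sequence).
def Pre_letra_mas_comun (cadena : String) : Prop :=
  (cadena.toList.any (fun c => !(pvPunctL.contains c))) = true
instance (cadena : String) : Decidable (Pre_letra_mas_comun cadena) := by unfold Pre_letra_mas_comun; infer_instance

def pvWitness_letra_mas_comun : String := "aabb"

def Spec_letra_mas_comun (cadena : String) (out : String) : Prop := out = letra_mas_comun_alt cadena
instance (cadena : String) (out : String) : Decidable (Spec_letra_mas_comun cadena out) := by unfold Spec_letra_mas_comun; infer_instance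

-- ===== CLAIM (what is proved, stated in full; the proofs are below) =====
def Claim_equal_letra_mas_comun : Prop := ∀ (cadena : String), Dom_letra_mas_comun cadena → Pre_letra_mas_comun cadena → Spec_letra_mas_comun cadena (letra_mas_comun cadena)

-- ===== LEMMAS AND PROOFS =====

-- ---- A-side: the 80 replace() passes strip exactly the punctuation characters ----

lemma pv_replace_go_single (a : Char) : ∀ (fuel : Nat) (l acc : List Char), l.length ≤ fuel →
    PySem.Chars.replace.go [a] [] fuel l acc = acc.reverse ++ l.filter (fun c => !(c == a)) := by
  intro fuel
  induction fuel with
  | zero =>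
    intro l acc h
    cases l with
    | nil => simp [PySem.Chars.replace.go]
    | cons c t => simp at h
  | succ n ih =>
    intro l acc h
    cases l with
    | nil => simp [PySem.Chars.replace.go]
    | cons c t =>
      rw [PySem.Chars.replace.go]
      by_cases hc : a = c
      · subst hc
        simp only [List.isPrefixOf, Bool.and_true, beq_self_eq_true, if_true]
        show PySem.Chars.replace.go [a] [] n t acc = _
        rw [ih t acc (by simpa using h)]
        simp
      · have hbc : ([a].isPrefixOf (c :: t)) = false := by
          simp [List.isPrefixOf, hc]
        simp only [hbc, Bool.false_eq_true, if_false]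
        rw [ih t (c :: acc) (by simpa using h)]
        have : (c == a) = false := by simp [Ne.symm hc]
        simp [this]

lemma pv_replace_single (cs : List Char) (a : Char) :
    PySem.Chars.replace cs [a] [] = cs.filter (fun c => !(c == a)) := by
  rw [PySem.Chars.replace]
  simp only [List.isEmpty_cons, Bool.false_eq_true, if_false]
  simpa using pv_replace_go_single a cs.length cs [] le_rfl

lemma pv_filter_chain : ∀ (as : List Char) (l : List Char),
    as.foldl (fun acc a => acc.filter (fun c => !(c == a))) l
      = l.filter (fun c => !(as.contains c)) := by
  intro as
  induction as with
  | nil => intro l; simp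
  | cons a t ih =>
    intro l
    rw [List.foldl_cons, ih, List.filter_filter]
    apply List.filter_congr
    intro c _
    by_cases h : c = a
    · simp [h]
    · simp [h]


set_option maxRecDepth 8000 in
set_option maxHeartbeats 1000000 in
lemma pv_strip (s : String) :
    ((PySem.Str.replace (PySem.Str.replace (PySem.Str.replace (PySem.Str.replace (PySem.Str.replace (PySem.Str.replace (PySem.Str.replace (PySem.Str.replace (PySem.Str.replace (PySem.Str.replace (PySem.Str.replace (PySem.Str.replace (PySem.Str.replace (PySem.Str.replace (PySem.Str.replace (PySem.Str.replace (PySem.Str.replace (PySem.Str.replace (PySem.Str.replace (PySem.Str.replace (PySem.Str.replace (PySem.Str.replace (PySem.Str.replace (PySem.Str.replace (PySem.Str.replace (PySem.Str.replace (PySem.Str.replace (PySem.Str.replace (PySem.Str.replace (PySem.Str.replace (PySem.Str.replace (PySem.Str.replace (PySem.Str.replace (PySem.Str.replace (PySem.Str.replace (PySem.Str.replace (PySem.Str.replace (PySem.Str.replace (PySem.Str.replace (PySem.Str.replace (PySem.Str.replace (PySem.Str.replace (PySem.Str.replace (PySem.Str.replace (PySem.Str.replace (PySem.Str.replace (PySem.Str.replace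 (PySem.Str.replace (PySem.Str.replace (PySem.Str.replace (PySem.Str.replace (PySem.Str.replace (PySem.Str.replace (PySem.Str.replace (PySem.Str.replace (PySem.Str.replace (PySem.Str.replace (PySem.Str.replace (PySem.Str.replace (PySem.Str.replace (PySem.Str.replace (PySem.Str.replace (PySem.Str.replace (PySem.Str.replace (PySem.Str.replace (PySem.Str.replace (PySem.Str.replace (PySem.Str.replace (PySem.Str.replace (PySem.Str.replace (PySem.Str.replace (PySem.Str.replace (PySem.Str.replace (PySem.Str.replace (PySem.Str.replace (PySem.Str.replace (PySem.Str.replace (PySem.Str.replace (PySem.Str.replace (PySem.Str.replace s " " "") "," "") "." "") "!" "") "?" "") "¿" "") "¡" "") ";" "") ":" "") "-" "") "_" "") "(" "") ")" "") "[" "") "]" "") "{" "") "}" "") "/" "") "\\" "") "*" "") "+" "") "=" "") "<" "") ">" "") "|" "") "@" "") "#" "") "$" "") "%" "") "&" "") "^" "") "~" "") "`" "") "¬" "") "'" "") "\"" "") "°" "") "¦" "") "·" "") "¿" "") "¡" "") "º" "") "ª" "") "¬" "") "µ" "") "·" "") "¸" "") "¹" "") "º" "") "¼" "") "½" "") "¾"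 "") "¿" "") "À" "") "Á" "") "Â" "") "Ã" "") "Ä" "") "Å" "") "Æ" "") "Ç" "") "È" "") "É" "") "Ê" "") "Ë" "") "Ì" "") "Í" "") "Î" "") "Ï" "") "Ð" "") "Ñ" "") "Ò" "") "Ó" "") "Ô" "") "Õ" "") "Ö" "") "Ø" "") "Ù" "") "Ú" "") "Û" "")).toList
      = s.toList.filter (fun c => !(pvPunctB.toList.contains c)) := by
  simp only [PySem.Str.toList_replace,
    show ("" : String).toList = [] from rfl,
    show (" " : String).toList = [' '] from rfl,
    show ("," : String).toList = [','] from rfl,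
    show ("." : String).toList = ['.'] from rfl,
    show ("!" : String).toList = ['!'] from rfl,
    show ("?" : String).toList = ['?'] from rfl,
    show ("¿" : String).toList = ['¿'] from rfl,
    show ("¡" : String).toList = ['¡'] from rfl,
    show (";" : String).toList = [';'] from rfl,
    show (":" : String).toList = [':'] from rfl,
    show ("-" : String).toList = ['-'] from rfl,
    show ("_" : String).toList = ['_'] from rfl,
    show ("(" : String).toList = ['('] from rfl,
    show (")" : String).toList = [')'] from rfl,
    show ("[" : String).toList = ['['] from rfl,
    show ("]" : String).toList = [']'] from rfl,
    show ("{" : String).toList = ['{'] from rfl,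
    show ("}" : String).toList = ['}'] from rfl,
    show ("/" : String).toList = ['/'] from rfl,
    show ("\\" : String).toList = ['\\'] from rfl,
    show ("*" : String).toList = ['*'] from rfl,
    show ("+" : String).toList = ['+'] from rfl,
    show ("=" : String).toList = ['='] from rfl,
    show ("<" : String).toList = ['<'] from rfl,
    show (">" : String).toList = ['>'] from rfl,
    show ("|" : String).toList = ['|'] from rfl,
    show ("@" : String).toList = ['@'] from rfl,
    show ("#" : String).toList = ['#'] from rfl,
    show ("$" : String).toList = ['$'] from rfl,
    show ("%" : String).toList = ['%'] from rfl,
    show ("&" : String).toList = ['&'] from rfl,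
    show ("^" : String).toList = ['^'] from rfl,
    show ("~" : String).toList = ['~'] from rfl,
    show ("`" : String).toList = ['`'] from rfl,
    show ("¬" : String).toList = ['¬'] from rfl,
    show ("'" : String).toList = ['\''] from rfl,
    show ("\"" : String).toList = ['"'] from rfl,
    show ("°" : String).toList = ['°'] from rfl,
    show ("¦" : String).toList = ['¦'] from rfl,
    show ("·" : String).toList = ['·'] from rfl,
    show ("º" : String).toList = ['º'] from rfl,
    show ("ª" : String).toList = ['ª'] from rfl,
    show ("µ" : String).toList = ['µ'] from rfl,
    show ("¸" : String).toList = ['¸'] from rfl,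
    show ("¹" : String).toList = ['¹'] from rfl,
    show ("¼" : String).toList = ['¼'] from rfl,
    show ("½" : String).toList = ['½'] from rfl,
    show ("¾" : String).toList = ['¾'] from rfl,
    show ("À" : String).toList = ['À'] from rfl,
    show ("Á" : String).toList = ['Á'] from rfl,
    show ("Â" : String).toList = ['Â'] from rfl,
    show ("Ã" : String).toList = ['Ã'] from rfl,
    show ("Ä" : String).toList = ['Ä'] from rfl,
    show ("Å" : String).toList = ['Å'] from rfl,
    show ("Æ" : String).toList = ['Æ'] from rfl,
    show ("Ç" : String).toList = ['Ç'] from rfl,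
    show ("È" : String).toList = ['È'] from rfl,
    show ("É" : String).toList = ['É'] from rfl,
    show ("Ê" : String).toList = ['Ê'] from rfl,
    show ("Ë" : String).toList = ['Ë'] from rfl,
    show ("Ì" : String).toList = ['Ì'] from rfl,
    show ("Í" : String).toList = ['Í'] from rfl,
    show ("Î" : String).toList = ['Î'] from rfl,
    show ("Ï" : String).toList = ['Ï'] from rfl,
    show ("Ð" : String).toList = ['Ð'] from rfl,
    show ("Ñ" : String).toList = ['Ñ'] from rfl,
    show ("Ò" : String).toList = ['Ò'] from rfl,
    show ("Ó" : String).toList = ['Ó'] from rfl,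
    show ("Ô" : String).toList = ['Ô'] from rfl,
    show ("Õ" : String).toList = ['Õ'] from rfl,
    show ("Ö" : String).toList = ['Ö'] from rfl,
    show ("Ø" : String).toList = ['Ø'] from rfl,
    show ("Ù" : String).toList = ['Ù'] from rfl,
    show ("Ú" : String).toList = ['Ú'] from rfl,
    show ("Û" : String).toList = ['Û'] from rfl,
    pv_replace_single]
  rw [show pvPunctB.toList = ([' ', ',', '.', '!', '?', '¿', '¡', ';', ':', '-', '_', '(', ')', '[', ']', '{', '}', '/', '\\', '*', '+', '=', '<', '>', '|', '@', '#', '$', '%', '&', '^', '~', '`', '¬', '\'', '"', '°', '¦', '·', '¿', '¡', 'º', 'ª', '¬', 'µ', '·', '¸', '¹', 'º', '¼', '½', '¾', '¿', 'À', 'Á', 'Â', 'Ã', 'Ä', 'Å', 'Æ', 'Ç', 'È', 'É', 'Ê', 'Ë', 'Ì', 'Í', 'Î', 'Ï', 'Ð', 'Ñ', 'Ò', 'Ó', 'Ô', 'Õ', 'Ö', 'Ø', 'Ù', 'Ú', 'Û'] : List Char) from rfl,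
    ← pv_filter_chain ([' ', ',', '.', '!', '?', '¿', '¡', ';', ':', '-', '_', '(', ')', '[', ']', '{', '}', '/', '\\', '*', '+', '=', '<', '>', '|', '@', '#', '$', '%', '&', '^', '~', '`', '¬', '\'', '"', '°', '¦', '·', '¿', '¡', 'º', 'ª', '¬', 'µ', '·', '¸', '¹', 'º', '¼', '½', '¾', '¿', 'À', 'Á', 'Â', 'Ã', 'Ä', 'Å', 'Æ', 'Ç', 'È', 'É', 'Ê', 'Ë', 'Ì', 'Í', 'Î', 'Ï', 'Ð', 'Ñ', 'Ò', 'Ó', 'Ô', 'Õ', 'Ö', 'Ø', 'Ù', 'Ú', 'Û'] : List Char) s.toList]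
  simp only [List.foldl_cons, List.foldl_nil]


-- ---- shared: set membership / counting dictionaries ----

lemma pv_punctL_eq : pvPunctB.toList = pvPunctL := by
  set_option maxRecDepth 4000 in rfl

lemma pv_contains_ofList (L : List Char) (c : Char) :
    (PySem.Set.ofList L).contains c = L.contains c := by
  by_cases h : c ∈ L
  · simp [PySem.Set.contains, PySem.Set.mem_ofList, h]
  · simp [PySem.Set.contains, PySem.Set.mem_ofList, h]

lemma pv_dicA (S : List Char) :
    S.foldl (fun d letra =>
        if d.contains letra then d.insert letra (d.getD letra 0 + 1) else d.insert letra (1 : Int))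
      PySem.Dict.empty = PySem.Dict.counter S := by
  rw [← PySem.Dict.foldl_insert_getD_add_one_eq_counter]
  apply PySem.List.foldl_congr_mem
  intro acc x _
  by_cases hc : acc.contains x = true
  · simp [hc]
  · rw [if_neg (by simp [hc]), PySem.Dict.getD_of_not_contains acc 0 (by simpa using hc)]
    norm_num

lemma pv_dicB (L : List Char) :
    L.foldl (fun d letra =>
        if (PySem.Set.ofList pvPunctB.toList).contains letra then d
        else d.insert letra (d.getD letra 0 + 1))
      PySem.Dict.empty
      = PySem.Dict.counter (L.filter (fun c => !(pvPunctB.toList.contains c))) := by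
  rw [← PySem.Dict.foldl_insert_getD_add_one_eq_counter,
      ← PySem.List.foldl_if_eq_foldl_filter]
  apply PySem.List.foldl_congr_mem
  intro acc x _
  rw [pv_contains_ofList]
  cases hc : pvPunctB.toList.contains x <;> simp

-- ---- B-side: what Python's max(…, key=lambda kv: (kv[1], kv[0])) returns ----

lemma pv_max2_go : ∀ (xs : List (Char × Int)) (b : Char × Int),
    ∃ m, List.foldl (fun acc x => match acc with
        | none => some x
        | some mm =>
            if (decide (mm.2 < x.2) || !decide (x.2 < mm.2) && decide (mm.1 < x.1)) = true
            then some x else some mm)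
      (some b) xs = some m
      ∧ (m = b ∨ m ∈ xs)
      ∧ (b.2 < m.2 ∨ (b.2 = m.2 ∧ b.1 ≤ m.1))
      ∧ ∀ y ∈ xs, (y.2 < m.2 ∨ (y.2 = m.2 ∧ y.1 ≤ m.1)) := by
  intro xs
  induction xs with
  | nil =>
    intro b
    exact ⟨b, rfl, Or.inl rfl, Or.inr ⟨rfl, le_refl _⟩, by simp⟩
  | cons x t ih =>
    intro b
    rw [List.foldl_cons]
    by_cases hC : (decide (b.2 < x.2) || !decide (x.2 < b.2) && decide (b.1 < x.1)) = true
    · obtain ⟨m, hm, hmem, hxm, hall⟩ := ih x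
      have hred : (match (some b : Option (Char × Int)) with
          | none => some x
          | some mm =>
              if (decide (mm.2 < x.2) || !decide (x.2 < mm.2) && decide (mm.1 < x.1)) = true
              then some x else some mm) = some x := by simp [hC]
      rw [hred]
      have hbx : b.2 < x.2 ∨ (b.2 = x.2 ∧ b.1 ≤ x.1) := by
        by_cases hv : b.2 < x.2
        · exact Or.inl hv
        · obtain ⟨h1, h2⟩ : ¬ x.2 < b.2 ∧ b.1 < x.1 := by simpa [hv] using hC
          exact Or.inr ⟨le_antisymm (not_lt.1 h1) (not_lt.1 hv), le_of_lt h2⟩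
      refine ⟨m, hm, ?_, ?_, ?_⟩
      · rcases hmem with h | h
        · exact Or.inr (h ▸ List.mem_cons_self)
        · exact Or.inr (List.mem_cons_of_mem _ h)
      · -- lexLe b m from lexLe b x and lexLe x m
        rcases hbx with h | ⟨h1, h2⟩
        · rcases hxm with h' | ⟨h1', h2'⟩
          · exact Or.inl (lt_trans h h')
          · exact Or.inl (h1' ▸ h)
        · rcases hxm with h' | ⟨h1', h2'⟩
          · exact Or.inl (h1 ▸ h')
          · exact Or.inr ⟨h1.trans h1', le_trans h2 h2'⟩
      · intro y hy
        rcases List.mem_cons.1 hy with h | h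
        · subst h; exact hxm
        · exact hall y h
    · obtain ⟨m, hm, hmem, hxm, hall⟩ := ih b
      have hred : (match (some b : Option (Char × Int)) with
          | none => some x
          | some mm =>
              if (decide (mm.2 < x.2) || !decide (x.2 < mm.2) && decide (mm.1 < x.1)) = true
              then some x else some mm) = some b := by simp [hC]
      rw [hred]
      have hxb : x.2 < b.2 ∨ (x.2 = b.2 ∧ x.1 ≤ b.1) := by
        by_cases hv : x.2 < b.2
        · exact Or.inl hv
        · have hv2 : ¬ b.2 < x.2 := fun hh => hC (by simp [hh])
          have he : x.2 = b.2 := le_antisymm (not_lt.1 hv2) (not_lt.1 hv)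
          have hb1 : ¬ b.1 < x.1 := fun hh => hC (by simp [hh, he])
          exact Or.inr ⟨he, not_lt.1 hb1⟩
      refine ⟨m, hm, ?_, hxm, ?_⟩
      · rcases hmem with h | h
        · exact Or.inl h
        · exact Or.inr (List.mem_cons_of_mem _ h)
      · intro y hy
        rcases List.mem_cons.1 hy with h | h
        · subst h
          rcases hxb with h | ⟨h1, h2⟩
          · rcases hxm with h' | ⟨h1', h2'⟩
            · exact Or.inl (lt_trans h h')
            · exact Or.inl (h1' ▸ h)
          · rcases hxm with h' | ⟨h1', h2'⟩
            · exact Or.inl (h1 ▸ h')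
            · exact Or.inr ⟨h1.trans h1', le_trans h2 h2'⟩
        · exact hall y h

lemma pv_max2_cons (x : Char × Int) (t : List (Char × Int)) :
    PySem.List.max2? (x :: t) (fun kv => kv.2) (fun kv => kv.1)
      = List.foldl (fun acc y => match acc with
          | none => some y
          | some mm =>
              if (decide (mm.2 < y.2) || !decide (y.2 < mm.2) && decide (mm.1 < y.1)) = true
              then some y else some mm)
        (some x) t := by
  unfold PySem.List.max2?
  rw [List.foldl_cons]
  congr 1
  funext acc y
  cases acc with
  | none => rfl
  | some mm => rfl


-- ---- A-side tail: sorted2 on constant second keys is sorting by the letter ----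

lemma pv_insertBy_congr (b1 b2 : (Char × Int) → (Char × Int) → Bool) (x : Char × Int) :
    ∀ ys, (∀ y ∈ ys, b1 x y = b2 x y) →
      PySem.List.insertBy b1 x ys = PySem.List.insertBy b2 x ys := by
  intro ys
  induction ys with
  | nil => intro _; rfl
  | cons y t ih =>
    intro h
    rw [PySem.List.insertBy.eq_2, PySem.List.insertBy.eq_2, h y List.mem_cons_self,
      ih (fun z hz => h z (List.mem_cons_of_mem _ hz))]

lemma pv_foldl_insertBy_congr (b1 b2 : (Char × Int) → (Char × Int) → Bool) :
    ∀ (xs acc : List (Char × Int)),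
      (∀ x ∈ xs, ∀ y, (y ∈ acc ∨ y ∈ xs) → b1 x y = b2 x y) →
      xs.foldl (fun a x => PySem.List.insertBy b1 x a) acc
        = xs.foldl (fun a x => PySem.List.insertBy b2 x a) acc := by
  intro xs
  induction xs with
  | nil => intro acc _; rfl
  | cons x t ih =>
    intro acc h
    rw [List.foldl_cons, List.foldl_cons,
      pv_insertBy_congr b1 b2 x acc (fun y hy => h x List.mem_cons_self y (Or.inl hy))]
    apply ih
    intro z hz y hy
    apply h z (List.mem_cons_of_mem _ hz)
    rcases hy with hy | hy
    · rcases (PySem.List.mem_insertBy b2 x y acc).1 hy with h' | h'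
      · exact Or.inr (h' ▸ List.mem_cons_self)
      · exact Or.inl h'
    · exact Or.inr (List.mem_cons_of_mem _ hy)

lemma pv_sorted2_const (xs : List (Char × Int)) (v : Int) (hv : ∀ kv ∈ xs, kv.2 = v) :
    PySem.List.sorted2 xs (fun kv => kv.1) (fun kv => kv.2)
      = PySem.List.sorted xs (fun kv => kv.1) := by
  unfold PySem.List.sorted2 PySem.List.sorted
  simp only [Bool.false_eq_true, if_false]
  apply pv_foldl_insertBy_congr
  intro x hx y hy
  have hy' : y.2 = v := by
    rcases hy with h | h
    · simp at h
    · exact hv y h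
  simp [hv x hx, hy']

lemma pv_sorted_getLast_max (xs : List (Char × Int)) (h : PySem.List.sorted xs (fun kv => kv.1) ≠ []) :
    ∀ kv ∈ xs, kv.1 ≤ ((PySem.List.sorted xs (fun kv => kv.1)).getLast h).1 := by
  intro kv hkv
  have hmem : kv ∈ PySem.List.sorted xs (fun kv => kv.1) := by
    rw [PySem.List.mem_sorted]; exact hkv
  obtain ⟨i, hi, hEq⟩ := List.mem_iff_getElem.1 hmem
  rw [List.getLast_eq_getElem]
  have hmono := PySem.List.key_sorted_getElem_mono (xs := xs) (key := fun kv => kv.1)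
      (p := i) (q := (PySem.List.sorted xs (fun kv => kv.1)).length - 1) (by omega) (by omega)
  rw [hEq] at hmono
  exact hmono

lemma pv_max2_some (x : Char × Int) (t : List (Char × Int)) :
    ∃ m, PySem.List.max2? (x :: t) (fun kv => kv.2) (fun kv => kv.1) = some m
      ∧ m ∈ (x :: t) ∧ ∀ y ∈ (x :: t), (y.2 < m.2 ∨ (y.2 = m.2 ∧ y.1 ≤ m.1)) := by
  obtain ⟨m, hm, hmem, hxm, hall⟩ := pv_max2_go t x
  refine ⟨m, by rw [pv_max2_cons]; exact hm, ?_, ?_⟩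
  · rcases hmem with h | h
    · exact h ▸ List.mem_cons_self
    · exact List.mem_cons_of_mem _ h
  · intro y hy
    rcases List.mem_cons.1 hy with h | h
    · subst h; exact hxm
    · exact hall y h

-- ===== VERDICT (by name: the statement is the Claim_ definition above) =====

theorem letra_mas_comun_spec : Claim_equal_letra_mas_comun := by
  intro cadena _hdom hpre
  unfold Spec_letra_mas_comun
  conv_lhs => unfold letra_mas_comun
  conv_rhs => unfold letra_mas_comun_alt
  simp only [pv_strip, pv_dicA]
  rw [pv_dicB]
  set S := cadena.toList.filter (fun c => !(pvPunctB.toList.contains c)) with hSdef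
  set d := PySem.Dict.counter S with hddef
  unfold Pre_letra_mas_comun at hpre
  obtain ⟨c0, hc0L, hc0P'⟩ := List.any_eq_true.1 hpre
  have hc0S : c0 ∈ S := by
    rw [hSdef]
    exact List.mem_filter.2 ⟨hc0L, by rw [pv_punctL_eq]; exact hc0P'⟩
  have hSne : S ≠ [] := List.ne_nil_of_mem hc0S
  have hnd : d.keys.Nodup := PySem.Dict.nodup_keys_counter S
  have hkeys : d.keys = PySem.Set.ofList S := PySem.Dict.keys_counter S
  have hkne : d.keys ≠ [] := by
    rw [hkeys]; exact List.ne_nil_of_mem ((PySem.Set.mem_ofList S c0).2 hc0S)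
  cases hmax : PySem.List.max? d.keys (fun k => d.getD k 0) with
  | none => exact absurd ((PySem.List.max?_eq_none_iff _ _).1 hmax) hkne
  | some kmax =>
  simp only []
  have hkmem : kmax ∈ d.keys := PySem.List.max?_mem hmax
  have hmaxv : ∀ k ∈ d.keys, d.getD k 0 ≤ d.getD kmax 0 := PySem.List.max?_isMax hmax
  set mayor := d.getD kmax 0 with hmayor
  set lista := d.items.filter (fun kv => kv.2 == mayor) with hlista
  have hitems : d.items = d.keys.map (fun k => (k, d.getD k 0)) := PySem.Dict.items_eq_map_keys d hnd 0
  have hitem_snd : ∀ kv ∈ d.items, kv.2 = d.getD kv.1 0 ∧ kv.1 ∈ d.keys := by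
    intro kv hkv; rw [hitems] at hkv
    obtain ⟨k, hk, hEq⟩ := List.mem_map.1 hkv
    cases hEq; exact ⟨rfl, hk⟩
  have hkmax_item : (kmax, mayor) ∈ d.items := by
    rw [hitems]; exact List.mem_map.2 ⟨kmax, hkmem, rfl⟩
  have hkmax_lista : (kmax, mayor) ∈ lista := by
    rw [hlista]; exact List.mem_filter.2 ⟨hkmax_item, by simp⟩
  have hlista_sub : ∀ kv ∈ lista, kv ∈ d.items ∧ kv.2 = mayor := by
    intro kv hkv; rw [hlista] at hkv
    have h' := List.mem_filter.1 hkv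
    exact ⟨h'.1, by simpa using h'.2⟩
  rw [pv_sorted2_const lista mayor (fun kv h => (hlista_sub kv h).2)]
  have hSome : PySem.List.sorted lista (fun kv => kv.1) ≠ [] := by
    rw [Ne, PySem.List.sorted_eq_nil_iff]
    exact List.ne_nil_of_mem hkmax_lista
  rw [PySem.List.pyGetD_neg_one _ _ hSome]
  set aRes := (PySem.List.sorted lista (fun kv => kv.1)).getLast hSome with haRes
  have haMem : aRes ∈ lista := by
    have hg := List.getLast_mem hSome
    rw [← haRes, PySem.List.mem_sorted] at hg
    exact hg
  have haMax : ∀ kv ∈ lista, kv.1 ≤ aRes.1 := pv_sorted_getLast_max lista hSome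
  obtain ⟨x0, t0, hx0⟩ : ∃ x0 t0, d.items = x0 :: t0 := by
    cases hitemsne : d.items with
    | nil => rw [hitemsne] at hkmax_item; cases hkmax_item
    | cons a b => exact ⟨a, b, rfl⟩
  obtain ⟨m, hm, hmMem, hmAll⟩ := pv_max2_some x0 t0
  rw [hx0, hm]
  have hmItems : m ∈ d.items := hx0 ▸ hmMem
  have hmAll' : ∀ y ∈ d.items, (y.2 < m.2 ∨ (y.2 = m.2 ∧ y.1 ≤ m.1)) := by
    rw [hx0]; exact hmAll
  have hm2 : m.2 = mayor := by
    have h1 : m.2 ≤ mayor := by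
      obtain ⟨he, hk⟩ := hitem_snd m hmItems
      rw [he]; exact hmaxv _ hk
    rcases hmAll' (kmax, mayor) hkmax_item with h | ⟨h, _⟩
    · exact absurd h (not_lt.2 h1)
    · exact h.symm
  have hmLista : m ∈ lista := by
    rw [hlista]; exact List.mem_filter.2 ⟨hmItems, by simp [hm2]⟩
  have ha2 : aRes.2 = mayor := (hlista_sub aRes haMem).2
  have h1 : m.1 ≤ aRes.1 := haMax m hmLista
  have h2 : aRes.1 ≤ m.1 := by
    rcases hmAll' aRes (hlista_sub aRes haMem).1 with h | ⟨_, h⟩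
    · rw [ha2, hm2] at h; exact absurd h (lt_irrefl _)
    · exact h
  rw [show aRes = m from Prod.ext (le_antisymm h2 h1) (ha2.trans hm2.symm)]
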